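-- pv_equiv track=rewrite | github.com/richardslab/EXWAS_pipeline | python_scripts/python_helpers/vep_helpers/parse_vep.py | __parse_eve_class25
-- ===== SOURCE A (Python) =====
-- def __parse_eve_class25(consequence,consequence_elem,EVE_CLASS25_ORDER):
--   eve_class25_preds = [x.upper().strip() for x in consequence_elem[1].split(',')]
--   eve_class25_preds = [x for x in eve_class25_preds if x!='.']
--   if len(eve_class25_preds) == 0:
--     return None
--
--   assert(
--     all(
--       [x in EVE_CLASS25_ORDER for x in eve_class25_preds]
--     )
--   ),f"invalid EVE class25 pred {consequence}"
--   for i in EVE_CLASS25_ORDER: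
--     if i in eve_class25_preds:
--       return i
--   assert(False)
-- ===== SOURCE B (Python) =====
-- def __parse_eve_class25(consequence, consequence_elem, EVE_CLASS25_ORDER):
--   # Single pass over the raw tokens keeping the best (smallest) priority index seen.
--   best = None
--   for tok in consequence_elem[1].split(','):
--     p = tok.upper().strip()
--     if p == '.':
--       continue
--     assert p in EVE_CLASS25_ORDER, f"invalid EVE class25 pred {consequence}"
--     i = EVE_CLASS25_ORDER.index(p)
--     if best is None or i < best:
--       best = i
--   return None if best is None else EVE_CLASS25_ORDER[best]
-- ===== Notes on version B (the rewrite author's own statement) =====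
-- stated objective: alternative
-- what changed: Replaces A's two intermediate list comprehensions plus a scan over EVE_CLASS25_ORDER with membership tests by a single fold over the raw tokens that keeps the smallest priority index seen, returning EVE_CLASS25_ORDER[best] at the end; the unreachable trailing assert disappears.
import Mathlib
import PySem

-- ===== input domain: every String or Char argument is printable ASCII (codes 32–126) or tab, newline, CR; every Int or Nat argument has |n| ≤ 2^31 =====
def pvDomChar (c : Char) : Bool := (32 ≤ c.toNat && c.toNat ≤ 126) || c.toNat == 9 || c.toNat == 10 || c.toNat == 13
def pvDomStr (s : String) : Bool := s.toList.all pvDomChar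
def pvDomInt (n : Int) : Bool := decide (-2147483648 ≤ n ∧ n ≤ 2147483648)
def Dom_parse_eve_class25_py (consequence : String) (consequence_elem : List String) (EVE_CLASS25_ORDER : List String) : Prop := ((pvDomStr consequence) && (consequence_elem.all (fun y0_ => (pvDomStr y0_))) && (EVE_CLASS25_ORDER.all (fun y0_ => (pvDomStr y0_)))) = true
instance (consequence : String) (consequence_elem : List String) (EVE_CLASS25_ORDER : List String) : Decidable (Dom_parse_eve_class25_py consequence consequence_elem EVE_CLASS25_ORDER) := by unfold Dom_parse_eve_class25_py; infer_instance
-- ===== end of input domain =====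

-- B replaces A's staged list comprehensions + scan over the priority order by one fold over
-- the raw tokens keeping the smallest priority index seen (alternative decomposition).
-- ===== PORT A =====
def parse_eve_class25_py (consequence : String) (consequence_elem : List String) (EVE_CLASS25_ORDER : List String) : Option String :=
  match PySem.List.pyGet? consequence_elem 1 with
  | none => none  -- IndexError, excluded by Pre_
  | some s1 =>
    let eve_class25_preds := ((PySem.Str.split? s1 ",").getD []).map (fun x => PySem.Str.strip (PySem.Str.upper x))
    let eve_class25_preds := eve_class25_preds.filter (fun x => x ≠ ".")
    if eve_class25_preds.length = 0 then none
    else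
      -- the assert (all preds in ORDER) raises outside Pre_; the loop over ORDER:
      match EVE_CLASS25_ORDER.find? (fun i => eve_class25_preds.contains i) with
      | some i => some i
      | none => none  -- assert(False), unreachable inside Pre_

-- ===== PORT B =====
def parse_eve_class25_py_alt (consequence : String) (consequence_elem : List String) (EVE_CLASS25_ORDER : List String) : Option String :=
  match PySem.List.pyGet? consequence_elem 1 with
  | none => none  -- IndexError, excluded by Pre_
  | some s1 =>
    let best := ((PySem.Str.split? s1 ",").getD []).foldl
      (fun best tok =>
        let p := PySem.Str.strip (PySem.Str.upper tok)
        if p = "." then best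
        else
          -- assert p ∈ ORDER raises outside Pre_, where index? is some; getD arm dead inside Pre_
          let i := (PySem.List.index? EVE_CLASS25_ORDER p).getD EVE_CLASS25_ORDER.length
          match best with
          | none => some i
          | some b => if i < b then some i else some b)
      (none : Option Nat)
    match best with
    | none => none
    | some b => EVE_CLASS25_ORDER[b]?  -- ORDER[best]; b < length inside Pre_

-- ===== PRECONDITION & SPEC =====
def pvPreds (s1 : String) : List String :=
  (((PySem.Str.split? s1 ",").getD []).map (fun x => PySem.Str.strip (PySem.Str.upper x))).filter (fun x => x ≠ ".")

-- Pre_ excludes exactly the raising inputs: consequence_elem shorter than 2 (IndexError) and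
-- a prediction list containing an entry outside EVE_CLASS25_ORDER (AssertionError).
def Pre_parse_eve_class25_py (consequence : String) (consequence_elem : List String) (EVE_CLASS25_ORDER : List String) : Prop :=
  2 ≤ consequence_elem.length ∧
  ∀ x ∈ pvPreds ((PySem.List.pyGet? consequence_elem 1).getD ""), x ∈ EVE_CLASS25_ORDER
instance (consequence : String) (consequence_elem : List String) (EVE_CLASS25_ORDER : List String) : Decidable (Pre_parse_eve_class25_py consequence consequence_elem EVE_CLASS25_ORDER) := by unfold Pre_parse_eve_class25_py; infer_instance

def pvWitness_parse_eve_class25_py : String × List String × List String := ("c", ["x", "benign, Pathogenic ,."], ["PATHOGENIC", "BENIGN"])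

def Spec_parse_eve_class25_py (consequence : String) (consequence_elem : List String) (EVE_CLASS25_ORDER : List String) (out : Option String) : Prop := out = parse_eve_class25_py_alt consequence consequence_elem EVE_CLASS25_ORDER
instance (consequence : String) (consequence_elem : List String) (EVE_CLASS25_ORDER : List String) (out : Option String) : Decidable (Spec_parse_eve_class25_py consequence consequence_elem EVE_CLASS25_ORDER out) := by unfold Spec_parse_eve_class25_py; infer_instance

-- ===== CLAIM =====
def Claim_equal_parse_eve_class25_py : Prop := ∀ (consequence : String) (consequence_elem : List String) (EVE_CLASS25_ORDER : List String), Dom_parse_eve_class25_py consequence consequence_elem EVE_CLASS25_ORDER → Pre_parse_eve_class25_py consequence consequence_elem EVE_CLASS25_ORDER → Spec_parse_eve_class25_py consequence consequence_elem EVE_CLASS25_ORDER (parse_eve_class25_py consequence consequence_elem EVE_CLASS25_ORDER)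

-- ===== LEMMAS AND PROOFS =====

-- the step B's fold performs, with the ORDER list fixed
def pvStep (ORDER : List String) (best : Option Nat) (tok : String) : Option Nat :=
  let p := PySem.Str.strip (PySem.Str.upper tok)
  if p = "." then best
  else
    let i := (PySem.List.index? ORDER p).getD ORDER.length
    match best with
    | none => some i
    | some b => if i < b then some i else some b

def pvKey (ORDER : List String) (x : String) : Nat :=
  (PySem.List.index? ORDER x).getD ORDER.length

-- B's fold over tokens = option-min fold over the keys of the filtered/mapped predictions
theorem fold_eq_keys (ORDER : List String) (toks : List String) (acc : Option Nat) :
    toks.foldl (pvStep ORDER) acc =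
    ((((toks.map (fun x => PySem.Str.strip (PySem.Str.upper x))).filter (fun x => x ≠ ".")).map (pvKey ORDER)).foldl
      (fun a i => match a with | none => some i | some b => if i < b then some i else some b) acc) := by
  induction toks generalizing acc with
  | nil => rfl
  | cons t ts ih =>
    simp only [List.map_cons, List.foldl_cons, List.filter_cons]
    by_cases h : PySem.Str.strip (PySem.Str.upper t) = "."
    · simp [pvStep, h, ih]
    · simp [pvStep, pvKey, h, ih]

-- characterization of the option-min fold: from some b it computes the running min
theorem omin_fold_some (l : List Nat) (b : Nat) :
    l.foldl (fun a i => match a with | none => some i | some c => if i < c then some i else some c) (some b)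
      = some (l.foldl min b) := by
  induction l generalizing b with
  | nil => rfl
  | cons x xs ih =>
    simp only [List.foldl_cons]
    have hstep : (if x < b then some x else some b) = some (min b x) := by
      by_cases h : x < b
      · simp [h, Nat.min_eq_right h.le]
      · simp [h, Nat.min_eq_left (Nat.le_of_not_lt h)]
    rw [hstep, ih (min b x)]

theorem foldl_min_mem (l : List Nat) (b : Nat) : l.foldl min b = b ∨ l.foldl min b ∈ l := by
  induction l generalizing b with
  | nil => left; rfl
  | cons x xs ih =>
    simp only [List.foldl_cons]
    rcases ih (min b x) with h | h
    · rw [h]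
      rcases Nat.le_total b x with hle | hle
      · left; exact Nat.min_eq_left hle
      · right; simp [Nat.min_eq_right hle]
    · right; exact List.mem_cons_of_mem _ h

theorem foldl_min_le (l : List Nat) (b : Nat) : l.foldl min b ≤ b ∧ ∀ j ∈ l, l.foldl min b ≤ j := by
  induction l generalizing b with
  | nil => exact ⟨le_refl _, by simp⟩
  | cons x xs ih =>
    obtain ⟨h1, h2⟩ := ih (min b x)
    refine ⟨le_trans h1 (Nat.min_le_left _ _), ?_⟩
    intro j hj
    rcases List.mem_cons.mp hj with rfl | hj
    · exact le_trans h1 (Nat.min_le_right _ _)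
    · exact h2 j hj

-- find? returns the element at the first index satisfying p
theorem find?_eq_getElem {α : Type} (l : List α) (p : α → Bool) (k : Nat) (hk : k < l.length)
    (hpk : p l[k] = true) (hlt : ∀ j (hj : j < k), p (l[j]'(by omega)) = false) :
    l.find? p = some l[k] := by
  induction l generalizing k with
  | nil => simp at hk
  | cons a t ih =>
    cases k with
    | zero =>
      simp only [List.getElem_cons_zero] at hpk ⊢
      simp only [List.find?_cons]
      simp [hpk]
    | succ k =>
      have h0 : p a = false := hlt 0 (by omega)
      simp only [List.find?_cons, h0, List.getElem_cons_succ]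
      exact ih k (by simpa using hk) (by simpa using hpk) (fun j hj => by simpa using hlt (j+1) (by omega))

theorem index?_le_of_getElem {α : Type} [DecidableEq α] (l : List α) (j : Nat) (hj : j < l.length) (k : Nat)
    (h : PySem.List.index? l l[j] = some k) : k ≤ j := by
  obtain ⟨hk, hv, hmin⟩ := PySem.List.getElem_of_index?_eq_some h
  by_contra hgt
  exact hmin j (by omega) rfl

-- the core lemma: A's first-ORDER-element-present = B's min-index selection
theorem body_eq (toks ORDER : List String)
    (hall : ∀ x ∈ ((toks.map (fun x => PySem.Str.strip (PySem.Str.upper x))).filter (fun x => x ≠ ".")), x ∈ ORDER) :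
    (if ((toks.map (fun x => PySem.Str.strip (PySem.Str.upper x))).filter (fun x => x ≠ ".")).length = 0 then none
     else match ORDER.find? (fun i => ((toks.map (fun x => PySem.Str.strip (PySem.Str.upper x))).filter (fun x => x ≠ ".")).contains i) with
       | some i => some i
       | none => (none : Option String)) =
    (match toks.foldl (pvStep ORDER) none with
     | none => none
     | some b => ORDER[b]?) := by
  set preds := (toks.map (fun x => PySem.Str.strip (PySem.Str.upper x))).filter (fun x => x ≠ ".") with hpreds
  rw [fold_eq_keys]
  cases hp : preds.map (pvKey ORDER) with
  | nil =>
    rw [List.map_eq_nil_iff] at hp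
    simp [hp]
  | cons k0 ks =>
    have hne : preds ≠ [] := by
      intro h; rw [h] at hp; simp at hp
    rw [show ((k0 :: ks).foldl (fun a i => match a with | none => some i | some b => if i < b then some i else some b) (none : Option Nat)) = some (ks.foldl min k0) by
      simp only [List.foldl_cons]; exact omin_fold_some ks k0]
    set k := ks.foldl min k0 with hkdef
    -- k is a key of some element of preds, and minimal among all keys
    have hkmem : k ∈ preds.map (pvKey ORDER) := by
      rw [hp]
      rcases foldl_min_mem ks k0 with h | h
      · rw [← hkdef] at h; rw [h]; exact List.mem_cons_self
      · exact List.mem_cons_of_mem _ h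
    have hkmin : ∀ j ∈ preds.map (pvKey ORDER), k ≤ j := by
      rw [hp]
      obtain ⟨h1, h2⟩ := foldl_min_le ks k0
      intro j hj
      rcases List.mem_cons.mp hj with rfl | hj
      · exact h1
      · exact h2 j hj
    obtain ⟨m, hmmem, hmk⟩ := List.mem_map.mp hkmem
    have hmO : m ∈ ORDER := hall m hmmem
    obtain ⟨ki, hik⟩ : ∃ ki, PySem.List.index? ORDER m = some ki := by
      cases h : PySem.List.index? ORDER m with
      | none => exact absurd hmO ((PySem.List.index?_eq_none_iff _ _).mp h)
      | some ki => exact ⟨ki, rfl⟩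
    have hkk : k = ki := by rw [← hmk]; simp only [pvKey]; rw [hik]; rfl
    obtain ⟨hki, hOk, _⟩ := PySem.List.getElem_of_index?_eq_some hik
    rw [if_neg (by simpa [List.length_eq_zero_iff] using hne)]
    have hfind : ORDER.find? (fun i => preds.contains i) = some (ORDER[ki]'hki) := by
      apply find?_eq_getElem
      · simpa [hOk] using hmmem
      · intro j hj
        simp only [List.contains_eq_mem, decide_eq_false_iff_not]
        intro hmemj
        have hle := hkmin _ (List.mem_map_of_mem hmemj)
        obtain ⟨kj, hikj⟩ : ∃ kj, PySem.List.index? ORDER (ORDER[j]'(by omega)) = some kj := by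
          cases h : PySem.List.index? ORDER (ORDER[j]'(by omega)) with
          | none => exact absurd (hall _ hmemj) ((PySem.List.index?_eq_none_iff _ _).mp h)
          | some kj => exact ⟨kj, rfl⟩
        have hkjle : kj ≤ j := index?_le_of_getElem ORDER j (by omega) kj hikj
        have : pvKey ORDER (ORDER[j]'(by omega)) = kj := by simp only [pvKey]; rw [hikj]; rfl
        omega
    rw [hfind, hkk]
    simp [List.getElem?_eq_getElem hki, hOk]

-- ===== VERDICT =====
theorem parse_eve_class25_py_spec : Claim_equal_parse_eve_class25_py := by
  intro consequence consequence_elem ORDER _ hpre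
  obtain ⟨hlen, hall⟩ := hpre
  unfold Spec_parse_eve_class25_py parse_eve_class25_py parse_eve_class25_py_alt
  cases hget : PySem.List.pyGet? consequence_elem 1 with
  | none =>
    have h1 : (1 : Int) < consequence_elem.length := by exact_mod_cast hlen
    simp [PySem.List.pyGet?, PySem.List.pyIdx?] at hget
    omega
  | some s1 =>
    have hall' : ∀ x ∈ pvPreds s1, x ∈ ORDER := by simpa [hget] using hall
    have := body_eq ((PySem.Str.split? s1 ",").getD []) ORDER (by simpa [pvPreds] using hall')
    simpa [pvStep] using this
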